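-- pv_equiv track=rewrite | github.com/saikumaryerra/ipl-data-project | utilities.py | count_of_elements_in_row
-- ===== SOURCE A (Python) =====
-- def sort_dict(dic):
--     output = {}
--     for key in sorted(dic):
--         output[key] = dic[key]
--     return output
--
-- def count_of_elements_in_row(x, reader_name):
--     output = {}
--     for matches in reader_name:
--         if matches[x] in output:
--             output[matches[x]] = output[matches[x]]+1
--         else:
--             output[matches[x]] = 1
--     y = sort_dict(output)
--     return y
-- ===== SOURCE B (Python) =====
-- def count_of_elements_in_row(x, reader_name):
--     vals = sorted(row[x] for row in reader_name)
--     out = {}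
--     rest = vals
--     while rest:
--         v = rest[0]
--         k = 1
--         while k < len(rest) and rest[k] == v:
--             k += 1
--         out[v] = k
--         rest = rest[k:]
--     return out
-- ===== Notes on version B (the rewrite author's own statement) =====
-- stated objective: alternative
-- what changed: Replaces the count-into-hash-then-sort-keys strategy with sort-all-values-then-group-adjacent-runs: the sorted value list is scanned once, emitting each run's value and length into the dict in sorted order.
import Mathlib
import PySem

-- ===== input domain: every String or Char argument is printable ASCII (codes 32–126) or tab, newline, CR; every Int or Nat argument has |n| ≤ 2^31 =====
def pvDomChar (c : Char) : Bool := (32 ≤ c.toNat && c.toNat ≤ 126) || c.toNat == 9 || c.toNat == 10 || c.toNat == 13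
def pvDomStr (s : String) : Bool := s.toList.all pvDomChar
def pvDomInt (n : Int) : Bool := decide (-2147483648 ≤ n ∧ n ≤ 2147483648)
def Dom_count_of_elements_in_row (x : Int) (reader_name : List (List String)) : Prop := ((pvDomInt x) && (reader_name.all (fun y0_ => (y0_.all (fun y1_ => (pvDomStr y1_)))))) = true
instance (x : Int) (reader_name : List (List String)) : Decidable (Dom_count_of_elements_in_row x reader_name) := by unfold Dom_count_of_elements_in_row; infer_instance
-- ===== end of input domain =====

-- B replaces A's count-into-hash-then-sort-keys strategy by sort-then-group-adjacent-runs
-- (alternative decomposition, same result; equivalence proved on inputs where no row raises IndexError).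

-- ===== PORT A =====
-- sort_dict(dic): fold over sorted(dic) inserting dic[key]; the dict is returned as its items list.
-- dic[key] is ported as getD (the keys iterated come from dic, so no KeyError).
def sortDictPort (dic : PySem.Dict String Int) : List (String × Int) :=
  ((PySem.List.sorted dic.keys (fun k => k) false).foldl
    (fun out key => out.insert key (dic.getD key 0)) PySem.Dict.empty).items

-- matches[x] is ported as pyGet? with a dummy default; Pre_ guarantees the index is in range.
def count_of_elements_in_row (x : Int) (reader_name : List (List String)) : List (String × Int) :=
  sortDictPort (reader_name.foldl
    (fun output matches_ =>
      let v := (PySem.List.pyGet? matches_ x).getD ""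
      if output.contains v then output.insert v (output.getD v 0 + 1)
      else output.insert v 1)
    PySem.Dict.empty)

-- ===== PORT B =====
-- inner while loop of B: length of the run of v at the front of rest[1:]
def runLen (v : String) : List String → Nat
  | [] => 0
  | u :: t => if u == v then 1 + runLen v t else 0

-- outer while loop of B: emit (value, run length) pairs; the fresh keys inserted into the
-- output dict append, so the dict being built IS this pair list.
def groupRuns : List String → List (String × Int)
  | [] => []
  | v :: t => (v, ((1 + runLen v t : Nat) : Int)) :: groupRuns (t.drop (runLen v t))
  termination_by l => l.length
  decreasing_by simp

def count_of_elements_in_row_alt (x : Int) (reader_name : List (List String)) : List (String × Int) :=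
  groupRuns (PySem.List.sorted
    (reader_name.map (fun row => (PySem.List.pyGet? row x).getD "")) (fun s => s) false)

-- ===== PRECONDITION & SPEC =====
-- A (and B) raise IndexError when some row has no element at index x; exactly those inputs are excluded.
def Pre_count_of_elements_in_row (x : Int) (reader_name : List (List String)) : Prop :=
  ∀ row ∈ reader_name, PySem.Raise.InRange row.length x
instance (x : Int) (reader_name : List (List String)) : Decidable (Pre_count_of_elements_in_row x reader_name) := by unfold Pre_count_of_elements_in_row; infer_instance

def pvWitness_count_of_elements_in_row : Int × List (List String) :=
  (0, [["b"], ["a"], ["b"]])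

def Spec_count_of_elements_in_row (x : Int) (reader_name : List (List String)) (out : List (String × Int)) : Prop := out = count_of_elements_in_row_alt x reader_name
instance (x : Int) (reader_name : List (List String)) (out : List (String × Int)) : Decidable (Spec_count_of_elements_in_row x reader_name out) := by unfold Spec_count_of_elements_in_row; infer_instance

-- ===== CLAIM (what is proved, stated in full; the proofs are below) =====
def Claim_equal_count_of_elements_in_row : Prop := ∀ (x : Int) (reader_name : List (List String)), Dom_count_of_elements_in_row x reader_name → Pre_count_of_elements_in_row x reader_name → Spec_count_of_elements_in_row x reader_name (count_of_elements_in_row x reader_name)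

-- ===== LEMMAS AND PROOFS =====

lemma groupRuns_nil : groupRuns [] = [] := by rw [groupRuns.eq_def]

lemma groupRuns_cons (v : String) (t : List String) :
    groupRuns (v :: t) = (v, ((1 + runLen v t : Nat) : Int)) :: groupRuns (t.drop (runLen v t)) := by
  rw [groupRuns.eq_def]

-- the run at the front of a sorted tail is a block of copies of v, and v does not survive the drop
lemma run_split (v : String) (t : List String) (ht : t.Pairwise (· ≤ ·))
    (hv : ∀ u ∈ t, v ≤ u) :
    t.take (runLen v t) = List.replicate (runLen v t) v ∧ v ∉ t.drop (runLen v t) := by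
  induction t with
  | nil => simp [runLen]
  | cons u t' ih =>
    by_cases h : u = v
    · subst h
      have ht' : t'.Pairwise (· ≤ ·) := ht.of_cons
      have hv' : ∀ w ∈ t', u ≤ w := fun w hw => List.rel_of_pairwise_cons ht hw
      obtain ⟨h1, h2⟩ := ih ht' hv'
      simp only [runLen, beq_self_eq_true, if_true]
      constructor
      · simpa [List.replicate_succ, Nat.add_comm 1 (runLen u t')] using h1
      · simpa [Nat.add_comm 1 (runLen u t')] using h2
    · have hne : (u == v) = false := by simp [h]
      simp only [runLen, hne]
      refine ⟨rfl, ?_⟩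
      intro hmem
      rcases List.mem_cons.mp hmem with h' | h'
      · exact h (h'.symm)
      · have huv : v < u := lt_of_le_of_ne (hv u (by simp)) (fun e => h e.symm)
        have huw : u ≤ v := List.rel_of_pairwise_cons ht h'
        exact absurd (lt_of_lt_of_le huv huw) (lt_irrefl v)

-- master lemma about B's grouping loop on a (weakly) sorted list
lemma groupRuns_spec : ∀ (n : Nat) (L : List String), L.length ≤ n → L.Pairwise (· ≤ ·) →
    groupRuns L = ((groupRuns L).map Prod.fst).map (fun k => (k, (L.count k : Int)))
    ∧ ((groupRuns L).map Prod.fst).Pairwise (· < ·)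
    ∧ (∀ u, u ∈ (groupRuns L).map Prod.fst ↔ u ∈ L) := by
  intro n
  induction n with
  | zero =>
    intro L hlen _
    have : L = [] := List.length_eq_zero_iff.mp (Nat.le_zero.mp hlen)
    subst this
    rw [groupRuns_nil]; simp
  | succ n ih =>
    intro L hlen hsorted
    cases L with
    | nil => rw [groupRuns_nil]; simp
    | cons v t =>
      have ht : t.Pairwise (· ≤ ·) := hsorted.of_cons
      have hv : ∀ u ∈ t, v ≤ u := fun u hu => List.rel_of_pairwise_cons hsorted hu
      obtain ⟨htake, hnot⟩ := run_split v t ht hv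
      have hrlen : (t.drop (runLen v t)).length ≤ n := by
        have : t.length ≤ n := by simpa using hlen
        simp only [List.length_drop]; omega
      have hrsorted : (t.drop (runLen v t)).Pairwise (· ≤ ·) :=
        ht.sublist (List.drop_sublist (runLen v t) t)
      have hvr : ∀ u ∈ t.drop (runLen v t), v < u := by
        intro u hu
        have hut : u ∈ t := List.drop_subset (runLen v t) t hu
        exact lt_of_le_of_ne (hv u hut) (fun e => by subst e; exact hnot hu)
      obtain ⟨he, hpw, hmem⟩ := ih (t.drop (runLen v t)) hrlen hrsorted
      have hsplit : t = List.replicate (runLen v t) v ++ t.drop (runLen v t) := by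
        conv_lhs => rw [← List.take_append_drop (runLen v t) t]
        rw [htake]
      have hcv : t.count v = runLen v t := by
        conv_lhs => rw [hsplit]
        rw [List.count_append, List.count_replicate_self,
          List.count_eq_zero.mpr hnot]
        omega
      have hcu : ∀ u, u ≠ v → t.count u = (t.drop (runLen v t)).count u := by
        intro u hu
        have hvu : ¬ ((v == u) = true) := by simp; exact fun e => hu (Eq.symm e)
        conv_lhs => rw [hsplit]
        rw [List.count_append, List.count_replicate, if_neg hvu, Nat.zero_add]
      refine ⟨?_, ?_, ?_⟩
      · rw [groupRuns_cons]
        simp only [List.map_cons]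
        refine List.cons_eq_cons.mpr ⟨?_, ?_⟩
        · have h1 : (v :: t).count v = 1 + runLen v t := by
            rw [List.count_cons_self, hcv]; omega
          rw [h1]
        · conv_lhs => rw [he]
          apply List.map_congr_left
          intro u hu
          have hur : u ∈ t.drop (runLen v t) := (hmem u).mp hu
          have hune : u ≠ v := fun e => hnot (by rwa [e] at hur)
          have hc : (v :: t).count u = (t.drop (runLen v t)).count u := by
            rw [List.count_cons_of_ne (fun e => hune e.symm), hcu u hune]
          rw [hc]
      · rw [groupRuns_cons]
        simp only [List.map_cons]
        exact List.pairwise_cons.mpr ⟨fun u hu => hvr u ((hmem u).mp hu), hpw⟩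
      · intro u
        rw [groupRuns_cons]
        simp only [List.map_cons, List.mem_cons]
        rw [hmem u]
        constructor
        · intro h
          rcases h with h | h
          · exact Or.inl h
          · exact Or.inr (List.drop_subset (runLen v t) t h)
        · intro h
          rcases h with h | h
          · exact Or.inl h
          · conv at h => rw [hsplit]
            rcases List.mem_append.mp h with h | h
            · exact Or.inl (List.eq_of_mem_replicate h)
            · exact Or.inr h

-- A's counting loop over the rows is collections.Counter of the extracted column values
lemma loopA_eq_counter (x : Int) (rows : List (List String)) :
    rows.foldl
      (fun output matches_ =>
        let v := (PySem.List.pyGet? matches_ x).getD ""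
        if output.contains v then output.insert v (output.getD v 0 + 1)
        else output.insert v 1)
      PySem.Dict.empty
    = PySem.Dict.counter (rows.map (fun row => (PySem.List.pyGet? row x).getD "")) := by
  have hstep : (fun (output : PySem.Dict String Int) (matches_ : List String) =>
      let v := (PySem.List.pyGet? matches_ x).getD ""
      if output.contains v then output.insert v (output.getD v 0 + 1)
      else output.insert v 1)
      = fun (output : PySem.Dict String Int) (matches_ : List String) =>
        output.insert ((PySem.List.pyGet? matches_ x).getD "")
          (output.getD ((PySem.List.pyGet? matches_ x).getD "") 0 + 1) := by
    funext d m
    by_cases h : d.contains ((PySem.List.pyGet? m x).getD "")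
    · simp [h]
    · have h' : d.contains ((PySem.List.pyGet? m x).getD "") = false := by simpa using h
      show (if d.contains ((PySem.List.pyGet? m x).getD "") then _ else _) = _
      rw [if_neg (by simp [h']), PySem.Dict.getD_of_not_contains d 0 h']
      norm_num
  rw [hstep, ← PySem.Dict.foldl_insert_getD_add_one_eq_counter, List.foldl_map]

-- sort_dict of a nodup-keyed dict is its items re-listed in sorted key order
lemma sortDictPort_spec (dic : PySem.Dict String Int) (hnd : dic.keys.Nodup) :
    sortDictPort dic
      = (PySem.List.sorted dic.keys (fun k => k) false).map (fun key => (key, dic.getD key 0)) := by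
  unfold sortDictPort
  have hperm : (PySem.List.sorted dic.keys (fun k => k) false).Perm dic.keys :=
    PySem.List.sorted_perm _ _ _
  have hnodup : (PySem.List.sorted dic.keys (fun k => k) false).Nodup := hperm.symm.nodup hnd
  have hfresh : ∀ a ∈ PySem.List.sorted dic.keys (fun k => k) false,
      (PySem.Dict.empty : PySem.Dict String Int).contains a = false := by
    intro a _; simp [PySem.Dict.contains_empty]
  have := PySem.Dict.items_foldl_insert_fresh
    (PySem.List.sorted dic.keys (fun k => k) false)
    (fun a => a) (fun a => dic.getD a 0) PySem.Dict.empty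
    hfresh (by simpa using hnodup)
  simpa using this

-- ===== VERDICT (by name: the statement is the Claim_ definition above) =====
theorem count_of_elements_in_row_spec : Claim_equal_count_of_elements_in_row := by
  intro x rows _hdom _hpre
  unfold Spec_count_of_elements_in_row count_of_elements_in_row count_of_elements_in_row_alt
  rw [loopA_eq_counter x rows]
  set vals : List String := rows.map (fun row => (PySem.List.pyGet? row x).getD "") with hvals
  rw [sortDictPort_spec _ (PySem.Dict.nodup_keys_counter vals)]
  -- B side analysis
  have hSsorted : (PySem.List.sorted vals (fun s => s) false).Pairwise (· ≤ ·) := by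
    simpa using PySem.List.sorted_pairwise vals (fun s => s)
  obtain ⟨he, hpw, hmem⟩ :=
    groupRuns_spec (PySem.List.sorted vals (fun s => s) false).length
      (PySem.List.sorted vals (fun s => s) false) le_rfl hSsorted
  have hSperm : (PySem.List.sorted vals (fun s => s) false).Perm vals :=
    PySem.List.sorted_perm _ _ _
  have hKnodup : ((groupRuns (PySem.List.sorted vals (fun s => s) false)).map Prod.fst).Nodup :=
    hpw.imp (fun h => ne_of_lt h)
  have hKperm : ((groupRuns (PySem.List.sorted vals (fun s => s) false)).map Prod.fst).Perm
      (PySem.Set.ofList vals) := by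
    rw [List.perm_ext_iff_of_nodup hKnodup (PySem.Set.nodup_ofList vals)]
    intro u
    rw [hmem u, PySem.Set.mem_ofList]
    exact ⟨fun h => hSperm.subset h, fun h => hSperm.symm.subset h⟩
  have hsortedK : PySem.List.sorted (PySem.Dict.counter vals).keys (fun k => k) false
      = (groupRuns (PySem.List.sorted vals (fun s => s) false)).map Prod.fst := by
    rw [PySem.Dict.keys_counter]
    exact PySem.List.sorted_eq_of_perm_of_pairwise_lt _ _ _ hKperm hpw
  rw [hsortedK]
  conv_rhs => rw [he]
  apply List.map_congr_left
  intro u _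
  have hcount : (PySem.List.sorted vals (fun s => s) false).count u = vals.count u :=
    hSperm.count_eq u
  rw [PySem.Dict.getD_counter, hcount]
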